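-- pv_equiv track=rewrite | github.com/nabilchaib/VSF | scripts/generate_content.py | split_tuples
-- ===== SOURCE A (Python) =====
-- def split_tuples(values_blob: str) -> list[str]:
--     tuples: list[str] = []
--     depth = 0
--     in_string = False
--     escape = False
--     start = 0
--
--     for idx, char in enumerate(values_blob):
--         if in_string:
--             if escape:
--                 escape = False
--             elif char == "\\":
--                 escape = True
--             elif char == "'":
--                 in_string = False
--             continue
--
--         if char == "'":
--             in_string = True
--         elif char == "(":
--             if depth == 0:
--                 start = idx
--             depth += 1
--         elif char == ")":
--             depth -= 1
--             if depth == 0: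
--                 tuples.append(values_blob[start : idx + 1])
--
--     return tuples
-- ===== SOURCE B (Python) =====
-- def split_tuples(values_blob: str) -> list[str]:
--     # Pass 1: mark which characters are processed OUTSIDE single-quoted
--     # string literals (escape \ and quote toggling as in SQL values blobs).
--     outside = []
--     in_string = False
--     escape = False
--     for char in values_blob:
--         outside.append(not in_string)
--         if in_string:
--             if escape:
--                 escape = False
--             elif char == "\\":
--                 escape = True
--             elif char == "'":
--                 in_string = False
--         elif char == "'":
--             in_string = True
--
--     # Pass 2: paren matching, acting only on characters outside strings.
--     tuples: list[str] = []
--     depth = 0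
--     start = 0
--     for idx, (char, out) in enumerate(zip(values_blob, outside)):
--         if not out:
--             continue
--         if char == "(":
--             if depth == 0:
--                 start = idx
--             depth += 1
--         elif char == ")":
--             depth -= 1
--             if depth == 0:
--                 tuples.append(values_blob[start : idx + 1])
--     return tuples
-- ===== Notes on version B (the rewrite author's own statement) =====
-- stated objective: alternative
-- what changed: Single fused lexer+matcher loop replaced by two passes: pass 1 builds a boolean mask of characters outside single-quoted literals (quote/escape state machine), pass 2 runs the paren-depth matcher only on unmasked characters.
import Mathlib
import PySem

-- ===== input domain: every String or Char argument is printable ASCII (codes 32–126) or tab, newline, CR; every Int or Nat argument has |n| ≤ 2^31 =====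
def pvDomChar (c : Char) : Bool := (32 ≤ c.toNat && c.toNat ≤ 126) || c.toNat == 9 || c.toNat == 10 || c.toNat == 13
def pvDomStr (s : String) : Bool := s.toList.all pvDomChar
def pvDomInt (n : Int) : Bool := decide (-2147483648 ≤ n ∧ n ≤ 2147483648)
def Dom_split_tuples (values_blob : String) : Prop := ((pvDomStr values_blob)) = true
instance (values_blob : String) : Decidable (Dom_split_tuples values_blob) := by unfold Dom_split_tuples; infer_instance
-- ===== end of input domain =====

-- B replaces A's fused lexer+paren-matcher loop by two passes (a string-literal mask, then
-- paren matching on unmasked characters); same O(n) cost, a different decomposition.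


-- ===== PORT A =====
-- A's single loop; state = (idx, depth, in_string, escape, start, tuples).
-- values_blob[start : idx+1] with 0 ≤ start ≤ idx+1 ≤ len is exactly (drop start).take (idx+1-start).
def splitTuplesLoopA (full : List Char) : List Char → Nat → Int → Bool → Bool → Nat → List String → List String
  | [], _, _, _, _, _, tuples => tuples
  | c :: cs, idx, depth, inStr, esc, start, tuples =>
    if inStr then
      if esc then splitTuplesLoopA full cs (idx+1) depth true false start tuples
      else if c = '\\' then splitTuplesLoopA full cs (idx+1) depth true true start tuples
      else if c = '\'' then splitTuplesLoopA full cs (idx+1) depth false esc start tuples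
      else splitTuplesLoopA full cs (idx+1) depth true esc start tuples
    else if c = '\'' then splitTuplesLoopA full cs (idx+1) depth true esc start tuples
    else if c = '(' then
      splitTuplesLoopA full cs (idx+1) (depth+1) inStr esc (if depth = 0 then idx else start) tuples
    else if c = ')' then
      splitTuplesLoopA full cs (idx+1) (depth-1) inStr esc start
        (if depth - 1 = 0 then tuples ++ [String.mk ((full.drop start).take (idx+1-start))] else tuples)
    else splitTuplesLoopA full cs (idx+1) depth inStr esc start tuples

def split_tuples (values_blob : String) : List String :=
  splitTuplesLoopA values_blob.toList values_blob.toList 0 0 false false 0 []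

-- ===== PORT B =====
-- B pass 1: boolean mask, bit i = character i is processed outside a string literal.
def maskLoopB : List Char → Bool → Bool → List Bool
  | [], _, _ => []
  | c :: cs, inStr, esc =>
    (!inStr) ::
      (if inStr then
        if esc then maskLoopB cs true false
        else if c = '\\' then maskLoopB cs true true
        else if c = '\'' then maskLoopB cs false esc
        else maskLoopB cs true esc
      else if c = '\'' then maskLoopB cs true esc
      else maskLoopB cs false esc)

-- B pass 2: paren matching over the zipped (char, outside) stream.
def parenLoopB (full : List Char) : List (Char × Bool) → Nat → Int → Nat → List String → List String
  | [], _, _, _, tuples => tuples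
  | (c, out) :: rest, idx, depth, start, tuples =>
    if out then
      if c = '(' then
        parenLoopB full rest (idx+1) (depth+1) (if depth = 0 then idx else start) tuples
      else if c = ')' then
        parenLoopB full rest (idx+1) (depth-1) start
          (if depth - 1 = 0 then tuples ++ [String.mk ((full.drop start).take (idx+1-start))] else tuples)
      else parenLoopB full rest (idx+1) depth start tuples
    else parenLoopB full rest (idx+1) depth start tuples

def split_tuples_alt (values_blob : String) : List String :=
  let cs := values_blob.toList
  parenLoopB cs (cs.zip (maskLoopB cs false false)) 0 0 0 []

-- ===== PRECONDITION & SPEC =====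
def Spec_split_tuples (values_blob : String) (out : List String) : Prop := out = split_tuples_alt values_blob
instance (values_blob : String) (out : List String) : Decidable (Spec_split_tuples values_blob out) := by unfold Spec_split_tuples; infer_instance

-- ===== CLAIM (what is proved, stated in full; the proofs are below) =====
def Claim_equal_split_tuples : Prop := ∀ (values_blob : String), Dom_split_tuples values_blob → Spec_split_tuples values_blob (split_tuples values_blob)

-- ===== LEMMAS AND PROOFS =====

-- A's fused loop equals B's pass 2 running on the zip of the input with B's pass-1 mask,
-- for every lexer state (inStr, esc) and matcher state (idx, depth, start, tuples).
theorem loopA_eq_loopB (full : List Char) :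
    ∀ (cs : List Char) (idx : Nat) (depth : Int) (inStr esc : Bool) (start : Nat) (tuples : List String),
      splitTuplesLoopA full cs idx depth inStr esc start tuples
        = parenLoopB full (cs.zip (maskLoopB cs inStr esc)) idx depth start tuples := by
  intro cs
  induction cs with
  | nil => intro idx depth inStr esc start tuples; simp [splitTuplesLoopA, maskLoopB, parenLoopB]
  | cons c cs ih =>
    intro idx depth inStr esc start tuples
    simp only [splitTuplesLoopA, maskLoopB, List.zip_cons_cons, parenLoopB]
    cases inStr <;> cases esc <;> simp only [Bool.not_true, Bool.not_false, if_true, if_false] <;>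
      split_ifs <;> simp_all [ih]

-- ===== VERDICT (by name: the statement is the Claim_ definition above) =====
theorem split_tuples_spec : Claim_equal_split_tuples := by
  intro s _
  unfold Spec_split_tuples split_tuples split_tuples_alt
  exact loopA_eq_loopB s.toList s.toList 0 0 false false 0 []
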